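-- pv_equiv track=rewrite | github.com/wiz21b/lowtech | utils.py | bool_array_to_stripes
-- ===== SOURCE A (Python) =====
-- def bool_array_to_stripes( d):
--     # d is an array of booleans
--     # d == True belongs to stripe, d == False doesn't.
--
--     # in_stripe = ( first_index, last_index )
--
--     in_stripe = None
--     stripes = []
--
--     for i in range(len(d)):
--         if d[i] and in_stripe:
--             # Extend stripe
--             in_stripe = (in_stripe[0], i)
--         elif d[i] and not in_stripe:
--             # Begin new stripe
--             in_stripe = (i,i)
--         elif not d[i] and in_stripe:
--             stripes.append( in_stripe)
--             in_stripe = None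
--         elif not d[i] and not in_stripe:
--             pass
--
--     if in_stripe:
--         stripes.append( in_stripe)
--
--     return stripes
-- ===== SOURCE B (Python) =====
-- def bool_array_to_stripes(d):
--     # Run-based scan: walk the array by maximal runs of equal truthiness;
--     # each True run contributes one stripe directly.
--     stripes = []
--     i = 0
--     n = len(d)
--     while i < n:
--         j = i
--         while j < n and bool(d[j]) == bool(d[i]):
--             j += 1
--         if d[i]:
--             stripes.append((i, j - 1))
--         i = j
--     return stripes
-- ===== Notes on version B (the rewrite author's own statement) =====
-- stated objective: alternative
-- what changed: B scans the array by maximal runs of equal booleans, emitting a complete stripe per True run, instead of A's element-by-element state machine that carries an open in_stripe tuple and flushes it on False or at the end.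
import Mathlib
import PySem

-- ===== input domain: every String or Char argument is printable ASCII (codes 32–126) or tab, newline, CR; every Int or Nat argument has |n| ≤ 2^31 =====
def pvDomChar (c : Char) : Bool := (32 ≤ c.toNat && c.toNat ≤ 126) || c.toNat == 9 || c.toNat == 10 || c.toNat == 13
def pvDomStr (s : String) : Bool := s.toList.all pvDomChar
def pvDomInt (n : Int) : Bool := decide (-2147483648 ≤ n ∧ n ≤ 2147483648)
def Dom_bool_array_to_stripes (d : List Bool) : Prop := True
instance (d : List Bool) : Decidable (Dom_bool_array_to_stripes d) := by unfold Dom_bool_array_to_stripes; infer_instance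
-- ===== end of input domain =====

-- B replaces A's open-stripe state machine by a run-at-a-time scan (one stripe per True run); same cost, different structure.

-- ===== PORT A =====
-- A's loop over i in range(len d) with state (in_stripe, stripes), branch for branch.
def pvGoA : List Bool → Int → Option (Int × Int) → List (Int × Int) → List (Int × Int)
  | [], _, st, stripes =>
      match st with
      | some s => stripes ++ [s]
      | none => stripes
  | b :: rest, i, st, stripes =>
      match b, st with
      | true, some s => pvGoA rest (i + 1) (some (s.1, i)) stripes
      | true, none => pvGoA rest (i + 1) (some (i, i)) stripes
      | false, some s => pvGoA rest (i + 1) none (stripes ++ [s])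
      | false, none => pvGoA rest (i + 1) none stripes

def bool_array_to_stripes (d : List Bool) : List (Int × Int) := pvGoA d 0 none []

-- ===== PORT B =====
-- B's outer while loop: consume one maximal run of equal booleans per step.
def pvGoB : List Bool → Int → List (Int × Int)
  | [], _ => []
  | b :: rest, i =>
      let m := (rest.takeWhile (· == b)).length
      let rest' := rest.dropWhile (· == b)
      let n : Int := 1 + (m : Int)
      if b then (i, i + n - 1) :: pvGoB rest' (i + n) else pvGoB rest' (i + n)
termination_by d _ => d.length
decreasing_by
  all_goals simpa using Nat.lt_succ_of_le (List.length_dropWhile_le _ _)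

def bool_array_to_stripes_alt (d : List Bool) : List (Int × Int) := pvGoB d 0

-- ===== PRECONDITION & SPEC =====
def Spec_bool_array_to_stripes (d : List Bool) (out : List (Int × Int)) : Prop := out = bool_array_to_stripes_alt d
instance (d : List Bool) (out : List (Int × Int)) : Decidable (Spec_bool_array_to_stripes d out) := by unfold Spec_bool_array_to_stripes; infer_instance

-- ===== CLAIM (what is proved, stated in full; the proofs are below) =====
def Claim_equal_bool_array_to_stripes : Prop := ∀ (d : List Bool), Dom_bool_array_to_stripes d → Spec_bool_array_to_stripes d (bool_array_to_stripes d)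

-- ===== LEMMAS AND PROOFS =====

-- pvGoA's accumulator is only ever appended to.
theorem pvGoA_acc (d : List Bool) : ∀ (i : Int) (st : Option (Int × Int)) (acc : List (Int × Int)),
    pvGoA d i st acc = acc ++ pvGoA d i st [] := by
  induction d with
  | nil => intro i st acc; cases st <;> simp [pvGoA]
  | cons b rest ih =>
    intro i st acc
    cases b with
    | false =>
      cases st with
      | none => simp only [pvGoA]; exact ih _ _ _
      | some s =>
        simp only [pvGoA]
        rw [ih (i+1) none (acc ++ [s]), ih (i+1) none ([] ++ [s])]
        simp
    | true =>
      cases st with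
      | none => simp only [pvGoA]; exact ih _ _ _
      | some s => simp only [pvGoA]; exact ih _ _ _

-- Skipping a leading False run does not change pvGoB's output.
theorem pvGoB_dropFalse (rest : List Bool) (i : Int) :
    pvGoB (false :: rest) i =
      pvGoB (rest.dropWhile (· == false)) (i + (1 + ((rest.takeWhile (· == false)).length : Int))) := by
  simp [pvGoB]

-- Main joint invariant: with no open stripe pvGoA agrees with pvGoB; with an open
-- stripe (a, e) it closes it at the end of the current True run (or at e).
theorem pvGoA_eq_pvGoB (d : List Bool) : ∀ (i : Int),
    (pvGoA d i none [] = pvGoB d i) ∧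
    (∀ a e : Int,
      pvGoA d i (some (a, e)) [] =
        (a, if (d.takeWhile (· == true)).length = 0 then e
            else i + ((d.takeWhile (· == true)).length : Int) - 1) ::
          pvGoB (d.dropWhile (· == true)) (i + ((d.takeWhile (· == true)).length : Int))) := by
  induction d with
  | nil =>
    intro i
    refine ⟨by simp [pvGoA, pvGoB], ?_⟩
    intro a e; simp [pvGoA, pvGoB]
  | cons b rest ih =>
    intro i
    cases b with
    | false =>
      constructor
      · show pvGoA rest (i+1) none [] = pvGoB (false :: rest) i
        rw [(ih (i+1)).1, pvGoB_dropFalse]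
        -- pvGoB rest (i+1) = pvGoB (dropWhile rest) (i + (1 + m))
        cases rest with
        | nil => simp [pvGoB]
        | cons b' r =>
          cases b' with
          | false =>
            rw [pvGoB_dropFalse]
            simp only [List.dropWhile, List.takeWhile]
            norm_num
            ring_nf
          | true =>
            simp [List.dropWhile, List.takeWhile]
      · intro a e
        show pvGoA rest (i+1) none ([] ++ [(a, e)]) = _
        rw [pvGoA_acc, (ih (i+1)).1]
        simp only [List.takeWhile, List.dropWhile]
        norm_num
        -- goal: pvGoB rest (i+1) = pvGoB (false::rest) i
        rw [pvGoB_dropFalse]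
        cases rest with
        | nil => simp [pvGoB]
        | cons b' r =>
          cases b' with
          | false =>
            rw [pvGoB_dropFalse]
            simp only [List.dropWhile, List.takeWhile]
            norm_num
            ring_nf
          | true =>
            simp [List.dropWhile, List.takeWhile]
    | true =>
      have hopen := (ih (i+1)).2
      have hval : ∀ e : Int,
          (if (rest.takeWhile (· == true)).length = 0 then e
           else i + 1 + ((rest.takeWhile (· == true)).length : Int) - 1) =
            (if (rest.takeWhile (· == true)).length = 0 then e
             else i + (1 + ((rest.takeWhile (· == true)).length : Int)) - 1) := by
        intro e
        by_cases h : (rest.takeWhile (· == true)).length = 0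
        · rw [if_pos h, if_pos h]
        · rw [if_neg h, if_neg h]; ring
      have hidx : i + 1 + ((rest.takeWhile (· == true)).length : Int)
          = i + (1 + ((rest.takeWhile (· == true)).length : Int)) := by ring
      constructor
      · show pvGoA rest (i+1) (some (i, i)) [] = pvGoB (true :: rest) i
        rw [hopen i i, hval i, hidx]
        simp only [pvGoB]
        by_cases h : (rest.takeWhile (· == true)).length = 0
        · have h' : (rest.takeWhile (fun x => x)).length = 0 := by simpa using h
          simp [h']
        · rw [if_neg h]; simp
      · intro a e
        show pvGoA rest (i+1) (some (a, i)) [] = _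
        rw [hopen a i, hval i, hidx]
        simp only [List.takeWhile_cons, List.dropWhile_cons]
        by_cases h : (rest.takeWhile (· == true)).length = 0
        · have h' : (rest.takeWhile (fun x => x)).length = 0 := by simpa using h
          simp [h']
        · rw [if_neg h]; simp
          constructor
          · ring
          · have : i + (1 + ((rest.takeWhile (fun x => x)).length : Int)) = i + (((rest.takeWhile (fun x => x)).length : Int) + 1) := by ring
            rw [this]

-- ===== VERDICT (by name: the statement is the Claim_ definition above) =====
theorem bool_array_to_stripes_spec : Claim_equal_bool_array_to_stripes := by
  intro d _
  show bool_array_to_stripes d = bool_array_to_stripes_alt d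
  exact (pvGoA_eq_pvGoB d 0).1
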